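-- pv_equiv track=rewrite | github.com/jarondl/wikidump2html | wikidump2html.py | try_table_fix
-- ===== SOURCE A (Python) =====
-- def try_table_fix(text):
--     ## Removing all table stylings,
--     ##
--     lines = text.split("\n")
--     for n in range(len(lines)):
--         if lines[n].startswith("|-"):
--             lines[n] = "|-"
--         if lines[n].startswith("{|"):
--             lines[n] = "{|"
--     return "\n".join(lines)
-- ===== SOURCE B (Python) =====
-- def try_table_fix(text):
--     # Single character-level pass: no line list is built; at each line start the
--     # prefix is checked and the rest of the line is skipped or copied verbatim.
--     out = []
--     i, n = 0, len(text)
--     while i < n: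
--         if text.startswith("|-", i):
--             out.append("|-")
--             while i < n and text[i] != "\n":
--                 i += 1
--         elif text.startswith("{|", i):
--             out.append("{|")
--             while i < n and text[i] != "\n":
--                 i += 1
--         else:
--             j = i
--             while j < n and text[j] != "\n":
--                 j += 1
--             out.append(text[i:j])
--             i = j
--         if i < n:
--             out.append("\n")
--             i += 1
--     return "".join(out)
-- ===== Notes on version B (the rewrite author's own statement) =====
-- stated objective: alternative
-- what changed: Replaces split-into-lines / index-loop with in-place assignments / rejoin by a single character-level scan that checks the prefix at each line start, skips the rest of a styled line, and copies other lines verbatim, never materialising a list of lines.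
import Mathlib
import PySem

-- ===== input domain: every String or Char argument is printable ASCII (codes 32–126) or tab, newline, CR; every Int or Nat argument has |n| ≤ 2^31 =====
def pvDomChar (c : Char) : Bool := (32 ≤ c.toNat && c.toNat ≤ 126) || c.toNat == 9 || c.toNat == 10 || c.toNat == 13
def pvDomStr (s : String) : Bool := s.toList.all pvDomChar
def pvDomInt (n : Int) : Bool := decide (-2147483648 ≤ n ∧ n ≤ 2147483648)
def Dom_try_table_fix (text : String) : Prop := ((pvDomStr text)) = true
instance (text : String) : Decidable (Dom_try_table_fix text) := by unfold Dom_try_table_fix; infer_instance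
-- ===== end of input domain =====

-- ===== PORT A =====
-- literal port of A: split on "\n", index loop rewriting styled lines, rejoin
def pvBodyA (ls : List (List Char)) (n : Int) : List (List Char) :=
  let ls1 := if PySem.Chars.startswith (PySem.List.pyGetD ls n []) ['|', '-']
             then PySem.List.pySetD ls n ['|', '-'] else ls
  if PySem.Chars.startswith (PySem.List.pyGetD ls1 n []) ['{', '|']
  then PySem.List.pySetD ls1 n ['{', '|'] else ls1

def try_table_fix (text : String) : String :=
  let lines := PySem.Chars.splitOn text.toList ['\n']
  let lines := (PySem.List.pyRange 0 lines.length 1).foldl pvBodyA lines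
  String.ofList (PySem.Chars.join ['\n'] lines)

-- ===== PORT B =====
-- literal port of B: one character-level pass; at each line start check the
-- prefix, skip the rest of a styled line (drop to the next newline), copy an
-- ordinary line verbatim (take/drop to the next newline), then recurse.
def pvFixB (cs : List Char) : List Char :=
  match cs with
  | [] => []
  | c :: rest =>
    let cur := c :: rest
    let head :=
      if PySem.Chars.startswith cur ['|', '-'] then ['|', '-']
      else if PySem.Chars.startswith cur ['{', '|'] then ['{', '|']
      else cur.takeWhile (fun x => x != '\n')
    match h : cur.dropWhile (fun x => x != '\n') with
    | '\n' :: rs => head ++ '\n' :: pvFixB rs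
    | _ => head
termination_by cs.length
decreasing_by
  have h1 : (List.dropWhile (fun x => x != '\n') (c :: rest)).length ≤ (c :: rest).length :=
    List.length_dropWhile_le _ _
  rw [h] at h1
  simp at h1 ⊢
  omega

def try_table_fix_alt (text : String) : String :=
  String.ofList (pvFixB text.toList)

-- ===== PRECONDITION & SPEC =====
def Spec_try_table_fix (text : String) (out : String) : Prop := out = try_table_fix_alt text
instance (text : String) (out : String) : Decidable (Spec_try_table_fix text out) := by unfold Spec_try_table_fix; infer_instance

-- ===== CLAIM (what is proved, stated in full; the proofs are below) =====
def Claim_equal_try_table_fix : Prop := ∀ (text : String), Dom_try_table_fix text → Spec_try_table_fix text (try_table_fix text)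

-- ===== LEMMAS AND PROOFS =====

-- the per-line transform A applies
def pvF (l : List Char) : List Char :=
  if PySem.Chars.startswith l ['|', '-'] then ['|', '-']
  else if PySem.Chars.startswith l ['{', '|'] then ['{', '|'] else l

-- splitOn ['\n'] as a direct structural recursion
def pvSp (cs : List Char) : List (List Char) :=
  cs.takeWhile (fun x => x != '\n') ::
    (match h : cs.dropWhile (fun x => x != '\n') with
     | _ :: rs => pvSp rs
     | [] => [])
termination_by cs.length
decreasing_by
  have h1 : (List.dropWhile (fun x => x != '\n') cs).length ≤ cs.length :=
    List.length_dropWhile_le _ _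
  rw [h] at h1
  simp at h1
  omega

def pvRest : List Char → List (List Char)
  | [] => []
  | _ :: rs => pvSp rs

theorem pvSp_eq (cs : List Char) :
    pvSp cs = cs.takeWhile (fun x => x != '\n') :: pvRest (cs.dropWhile (fun x => x != '\n')) := by
  rw [pvSp]
  congr 1
  cases h : cs.dropWhile (fun x => x != '\n') <;> simp [pvRest]

theorem pvTake_pos {c : Char} (h : (c != '\n') = true) (l : List Char) :
    List.takeWhile (fun x => x != '\n') (c :: l) = c :: List.takeWhile (fun x => x != '\n') l := by
  simp [h]

theorem pvTake_neg (l : List Char) :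
    List.takeWhile (fun x => x != '\n') ('\n' :: l) = [] := by
  simp

theorem pvDrop_pos {c : Char} (h : (c != '\n') = true) (l : List Char) :
    List.dropWhile (fun x => x != '\n') (c :: l) = List.dropWhile (fun x => x != '\n') l := by
  simp [h]

theorem pvDrop_neg (l : List Char) :
    List.dropWhile (fun x => x != '\n') ('\n' :: l) = '\n' :: l := by
  simp

theorem pvDropWhile_head {p : Char → Bool} {l : List Char} {y : Char} {ys : List Char}
    (h : l.dropWhile p = y :: ys) : p y = false := by
  induction l with
  | nil => simp at h
  | cons c cs ih =>
    by_cases hc : p c = true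
    · rw [List.dropWhile_cons_of_pos hc] at h; exact ih h
    · rw [List.dropWhile_cons_of_neg hc] at h
      cases h; simpa using hc

theorem pvGo_spec (fuel : Nat) (l cur : List Char) (acc : List (List Char)) (hf : l.length < fuel) :
    PySem.Chars.splitOn.go ['\n'] fuel l cur acc =
      acc.reverse ++ (cur.reverse ++ l.takeWhile (fun x => x != '\n')) ::
        pvRest (l.dropWhile (fun x => x != '\n')) := by
  induction fuel generalizing l cur acc with
  | zero => omega
  | succ fuel ih =>
    cases l with
    | nil => simp [PySem.Chars.splitOn.go, pvRest]
    | cons c rest =>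
      by_cases hc : c = '\n'
      · subst hc
        have hp : (['\n'] : List Char).isPrefixOf ('\n' :: rest) = true := by
          simp [List.isPrefixOf]
        rw [PySem.Chars.splitOn.go]
        simp only [hp, if_true, List.length_cons, List.length_nil, List.drop_succ_cons,
          List.drop_zero]
        rw [ih rest [] (cur.reverse :: acc) (by simp at hf; omega)]
        rw [pvDrop_neg, pvTake_neg]
        rw [show pvRest ('\n' :: rest) = pvSp rest from rfl, pvSp_eq]
        simp
      · have hcb : (c != '\n') = true := by simp [hc]
        have hne : ('\n' == c) = false := beq_eq_false_iff_ne.mpr (fun h => hc h.symm)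
        have hp : (['\n'] : List Char).isPrefixOf (c :: rest) = false := by
          simp [List.isPrefixOf, hne]
        rw [PySem.Chars.splitOn.go]
        simp only [hp, Bool.false_eq_true, if_false]
        rw [ih rest (c :: cur) acc (by simp at hf; omega)]
        rw [pvTake_pos hcb, pvDrop_pos hcb]
        simp

theorem pvSplitOn_eq (cs : List Char) : PySem.Chars.splitOn cs ['\n'] = pvSp cs := by
  rw [PySem.Chars.splitOn, pvGo_spec (cs.length + 1) cs [] [] (by omega), pvSp_eq]
  simp

theorem pvBodyA_spec (front : List (List Char)) (x : List Char) (post : List (List Char)) :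
    pvBodyA (front ++ x :: post) (front.length : Int) = front ++ pvF x :: post := by
  have hget : PySem.List.pyGetD (front ++ x :: post) (front.length : Int) [] = x := by
    simp [PySem.List.pyGetD_natCast]
  have hset : ∀ v, PySem.List.pySetD (front ++ x :: post) (front.length : Int) v
      = front ++ v :: post := by
    intro v
    rw [PySem.List.pySetD_natCast]
    rw [List.set_append_right _ _ (le_refl _)]
    simp
  unfold pvBodyA pvF
  by_cases h1 : PySem.Chars.startswith x ['|', '-'] = true
  · have hget2 : PySem.List.pyGetD (front ++ ['|', '-'] :: post) (front.length : Int) []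
        = ['|', '-'] := by simp [PySem.List.pyGetD_natCast]
    simp only [hget, h1, if_true, hset, hget2]
    have hno : PySem.Chars.startswith ['|', '-'] ['{', '|'] = false := by decide
    simp [hno]
  · simp only [hget, h1, Bool.false_eq_true, if_false]
    by_cases h2 : PySem.Chars.startswith x ['{', '|'] = true
    · simp [h2, hset]
    · simp [h2]

theorem pvLoopA (post front : List (List Char)) :
    (PySem.List.pyRange (front.length : Int) ((front.length : Int) + post.length) 1).foldl
        pvBodyA (front ++ post) = front ++ post.map pvF := by
  induction post generalizing front with
  | nil =>
    have h0 : PySem.List.pyRange (front.length : Int) (front.length : Int) 1 = [] := by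
      simp [PySem.List.pyRange]
    simp [h0]
  | cons x post ih =>
    have hlt : (front.length : Int) < (front.length : Int) + (x :: post).length := by
      simp only [List.length_cons]
      push_cast
      omega
    rw [PySem.List.pyRange_one_cons hlt, List.foldl_cons, pvBodyA_spec]
    have h2 := ih (front ++ [pvF x])
    simp only [List.length_append, List.length_cons, List.length_nil, List.append_assoc,
      List.cons_append, List.nil_append] at h2 ⊢
    push_cast at h2 ⊢
    have hb : ((front.length : Int)) + ((post.length : Int) + 1)
        = ((front.length : Int) + 1) + (post.length : Int) := by ring
    rw [hb]
    exact h2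

theorem pvSw_takeWhile (a b : Char) (ha : a ≠ '\n') (hb : b ≠ '\n') (cs : List Char) :
    PySem.Chars.startswith (cs.takeWhile (fun x => x != '\n')) [a, b] =
      PySem.Chars.startswith cs [a, b] := by
  have hab : (a == '\n') = false := beq_eq_false_iff_ne.mpr ha
  have hbb : (b == '\n') = false := beq_eq_false_iff_ne.mpr hb
  unfold PySem.Chars.startswith
  cases cs with
  | nil => rfl
  | cons c cs' =>
    by_cases hc : c = '\n'
    · subst hc
      rw [pvTake_neg]
      have h2 : List.isPrefixOf [a, b] ('\n' :: cs') = false := by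
        simp [List.isPrefixOf, hab]
      rw [h2]
      rfl
    · have hcb : (c != '\n') = true := by simp [hc]
      rw [pvTake_pos hcb]
      simp only [List.isPrefixOf]
      cases cs' with
      | nil => rfl
      | cons c2 cs'' =>
        by_cases hc2 : c2 = '\n'
        · subst hc2
          rw [pvTake_neg]
          have h2 : List.isPrefixOf [b] ('\n' :: cs'') = false := by
            simp [List.isPrefixOf, hbb]
          rw [h2]
          simp [List.isPrefixOf]
        · have hcb2 : (c2 != '\n') = true := by simp [hc2]
          rw [pvTake_pos hcb2]
          simp [List.isPrefixOf]

theorem pvFixB_cons (c : Char) (rest : List Char) :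
    pvFixB (c :: rest) =
      (if PySem.Chars.startswith (c :: rest) ['|', '-'] then ['|', '-']
       else if PySem.Chars.startswith (c :: rest) ['{', '|'] then ['{', '|']
       else List.takeWhile (fun x => x != '\n') (c :: rest)) ++
      (match List.dropWhile (fun x => x != '\n') (c :: rest) with
       | '\n' :: rs => '\n' :: pvFixB rs
       | _ => []) := by
  rw [pvFixB]
  split
  · rename_i rs heq
    simp only [heq]
  · rename_i heq
    cases hd : List.dropWhile (fun x => x != '\n') (c :: rest) with
    | nil => simp
    | cons y ys =>
      have hy := pvDropWhile_head hd
      simp at hy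
      subst hy
      exact absurd hd (fun h => heq ys h)

theorem pvF_take (c : Char) (rest : List Char) :
    pvF (List.takeWhile (fun x => x != '\n') (c :: rest)) =
      (if PySem.Chars.startswith (c :: rest) ['|', '-'] then ['|', '-']
       else if PySem.Chars.startswith (c :: rest) ['{', '|'] then ['{', '|']
       else List.takeWhile (fun x => x != '\n') (c :: rest)) := by
  unfold pvF
  rw [pvSw_takeWhile '|' '-' (by decide) (by decide),
      pvSw_takeWhile '{' '|' (by decide) (by decide)]

theorem pvFixB_eq_aux : ∀ (n : Nat) (cs : List Char), cs.length ≤ n →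
    pvFixB cs = PySem.Chars.join ['\n'] ((pvSp cs).map pvF) := by
  intro n
  induction n with
  | zero =>
    intro cs hlen
    have hnil : cs = [] := by cases cs with
      | nil => rfl
      | cons a as => simp at hlen
    subst hnil
    rw [pvFixB, pvSp_eq]
    decide
  | succ n ih =>
    intro cs hlen
    cases cs with
    | nil =>
      rw [pvFixB, pvSp_eq]
      decide
    | cons c rest =>
      rw [pvFixB_cons]
      cases hd : List.dropWhile (fun x => x != '\n') (c :: rest) with
      | nil =>
        rw [pvSp_eq, hd]
        simp only [pvRest, List.map_cons, List.map_nil]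
        rw [PySem.Chars.join_singleton, pvF_take]
        simp
      | cons y ys =>
        have hy := pvDropWhile_head hd
        simp at hy
        subst hy
        simp only [hd]
        have hlen2 : ys.length ≤ n := by
          have h1 := List.length_dropWhile_le (fun x => x != '\n') (c :: rest)
          rw [hd] at h1
          simp at h1 hlen
          omega
        rw [ih ys hlen2]
        conv_rhs => rw [pvSp_eq, hd]
        simp only [pvRest]
        conv_rhs => rw [pvSp_eq ys]
        simp only [List.map_cons]
        rw [PySem.Chars.join_cons_cons]
        rw [← List.map_cons, ← pvSp_eq ys, pvF_take]
        simp

theorem pvFixB_eq (cs : List Char) :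
    pvFixB cs = PySem.Chars.join ['\n'] ((pvSp cs).map pvF) :=
  pvFixB_eq_aux cs.length cs (le_refl _)

-- ===== VERDICT (by name: the statement is the Claim_ definition above) =====
theorem try_table_fix_spec : Claim_equal_try_table_fix := by
  intro text _
  unfold Spec_try_table_fix try_table_fix try_table_fix_alt
  rw [pvSplitOn_eq, pvFixB_eq]
  have h := pvLoopA (pvSp text.toList) []
  simp only [List.length_nil, Nat.cast_zero, List.nil_append, zero_add] at h
  simp only [h]
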